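-- pv_equiv track=rewrite | github.com/Geovanni-Gonzalez/SistemaDeGestionPulperia-ConsolApp | programa/Proyecto1.py | mi_replace
-- ===== SOURCE A (Python) =====
-- def mi_len(iterable):
--     """Calcula la longitud de un iterable."""
--     contador = 0
--     for _ in iterable:
--         contador += 1
--     return contador
--
-- def mi_replace(texto, viejo, nuevo):
--     """Reemplaza subcadenas."""
--     # Implementación simple para reemplazo caracter a caracter o similar
--     # Dado que split y join son métodos, haremos algo manual
--     res = ""
--     i = 0
--     long_viejo = mi_len(viejo)
--     while i < mi_len(texto):
--         # Miriar si coincide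
--         coincide = True
--         for j in range(long_viejo):
--             if i + j >= mi_len(texto) or texto[i+j] != viejo[j]:
--                 coincide = False
--                 break
--
--         if coincide:
--             res += nuevo
--             i += long_viejo
--         else:
--             res += texto[i]
--             i += 1
--     return res
-- ===== SOURCE B (Python) =====
-- def mi_replace(texto, viejo, nuevo):
--     """Reemplaza subcadenas (match-jumping: copy chunks between occurrences)."""
--     partes = []
--     i = 0
--     n = len(texto)
--     while i < n:
--         pos = texto.find(viejo, i)
--         if pos == -1:
--             break
--         partes.append(texto[i:pos])
--         partes.append(nuevo)
--         i = pos + len(viejo)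
--     partes.append(texto[i:])
--     return "".join(partes)
-- ===== Notes on version B (the rewrite author's own statement) =====
-- stated objective: faster
-- what changed: B jumps from match to match (find next occurrence, copy the untouched chunk, append nuevo) and joins the pieces, instead of A's character-by-character scan that recomputes mi_len(texto) on every loop test and inner comparison.
import Mathlib
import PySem

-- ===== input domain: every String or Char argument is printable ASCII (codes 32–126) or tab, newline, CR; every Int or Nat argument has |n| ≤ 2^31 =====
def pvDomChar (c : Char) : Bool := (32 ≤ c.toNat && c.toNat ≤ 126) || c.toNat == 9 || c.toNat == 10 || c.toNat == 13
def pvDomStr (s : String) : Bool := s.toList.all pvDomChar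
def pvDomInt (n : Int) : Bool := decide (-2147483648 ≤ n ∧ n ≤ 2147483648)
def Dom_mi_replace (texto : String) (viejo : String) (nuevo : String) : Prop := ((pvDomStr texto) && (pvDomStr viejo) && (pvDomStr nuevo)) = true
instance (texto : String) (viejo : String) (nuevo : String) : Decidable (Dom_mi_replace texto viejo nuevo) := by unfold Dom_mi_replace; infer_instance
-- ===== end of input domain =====

-- B replaces A's char-by-char scan (which recomputes mi_len each step) by match-to-match
-- chunk copying; equality of the return values is proved on Pre_ (A never returns outside it).

-- ===== PORT A =====
-- inner 'for j in range(long_viejo)' loop of A: does viejo match texto at position i?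
def pvMatchA (t v : List Char) (i j : Nat) : Bool :=
  if _h : j < v.length then
    if i + j ≥ t.length then false
    else if t.getD (i + j) ' ' ≠ v.getD j ' ' then false
    else pvMatchA t v i (j + 1)
  else true
termination_by v.length - j
decreasing_by omega

-- A's while loop; fuel bounds the iterations (the loop runs ≤ |texto| times whenever viejo ≠ "",
-- the only case in which the Python loop terminates — see Pre_mi_replace).
def pvAGo (t v nu : List Char) (fuel i : Nat) (res : List Char) : List Char :=
  match fuel with
  | 0 => res
  | fuel + 1 =>
    if i < t.length then
      if pvMatchA t v i 0 then pvAGo t v nu fuel (i + v.length) (res ++ nu)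
      else pvAGo t v nu fuel (i + 1) (res ++ [t.getD i ' '])
    else res

def mi_replace (texto : String) (viejo : String) (nuevo : String) : String :=
  String.ofList (pvAGo texto.toList viejo.toList nuevo.toList (texto.toList.length + 1) 0 [])

-- ===== PORT B =====
-- port of Python's texto.find(viejo, i): first position p ≥ i with texto[p:p+len(viejo)] == viejo
def pvFindFrom (t v : List Char) (i : Nat) : Option Nat :=
  if _h : i + v.length ≤ t.length then
    if (t.drop i).take v.length = v then some i
    else pvFindFrom t v (i + 1)
  else none
termination_by t.length + 1 - i
decreasing_by omega

-- B's while loop; fuel bounds the iterations (each found match advances i by ≥ 1 when viejo ≠ "")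
def pvBGo (t v nu : List Char) (fuel i : Nat) (acc : List Char) : List Char :=
  match fuel with
  | 0 => acc
  | fuel + 1 =>
    if i < t.length then
      match pvFindFrom t v i with
      | none => acc ++ t.drop i
      | some p => pvBGo t v nu fuel (p + v.length) (acc ++ (t.drop i).take (p - i) ++ nu)
    else acc ++ t.drop i

def mi_replace_alt (texto : String) (viejo : String) (nuevo : String) : String :=
  String.ofList (pvBGo texto.toList viejo.toList nuevo.toList (texto.toList.length + 1) 0 [])

-- ===== PRECONDITION & SPEC =====
-- Pre_ excludes exactly viejo == "" with texto nonempty: there Python A (and B) loops forever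
-- and never returns a value.
def Pre_mi_replace (texto : String) (viejo : String) (nuevo : String) : Prop :=
  viejo = "" → texto = ""
instance (texto : String) (viejo : String) (nuevo : String) : Decidable (Pre_mi_replace texto viejo nuevo) := by unfold Pre_mi_replace; infer_instance

def pvWitness_mi_replace : String × String × String := ("abcabd", "ab", "xy")

def Spec_mi_replace (texto : String) (viejo : String) (nuevo : String) (out : String) : Prop := out = mi_replace_alt texto viejo nuevo
instance (texto : String) (viejo : String) (nuevo : String) (out : String) : Decidable (Spec_mi_replace texto viejo nuevo out) := by unfold Spec_mi_replace; infer_instance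

-- ===== CLAIM (what is proved, stated in full; the proofs are below) =====
def Claim_equal_mi_replace : Prop := ∀ (texto : String) (viejo : String) (nuevo : String), Dom_mi_replace texto viejo nuevo → Pre_mi_replace texto viejo nuevo → Spec_mi_replace texto viejo nuevo (mi_replace texto viejo nuevo)

-- ===== LEMMAS AND PROOFS =====

-- (t.drop i).take v.length = v forces i + v.length ≤ t.length (for nonempty v)
theorem pvSliceEq_le (t v : List Char) (i : Nat) (hv : 0 < v.length)
    (h : (t.drop i).take v.length = v) : i + v.length ≤ t.length := by
  have := congrArg List.length h
  simp only [List.length_take, List.length_drop] at this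
  omega

-- characterization of A's inner loop as a slice equality
theorem pvMatchA_iff_aux (t v : List Char) (i : Nat) :
    ∀ d j, v.length - j = d →
      (pvMatchA t v i j = true ↔ (t.drop (i + j)).take (v.length - j) = v.drop j) := by
  intro d
  induction d with
  | zero =>
    intro j hj
    have hjm : ¬ j < v.length := by omega
    rw [pvMatchA, dif_neg hjm, hj]
    simp [List.drop_eq_nil_of_le (by omega : v.length ≤ j)]
  | succ d ih =>
    intro j hj
    have hjm : j < v.length := by omega
    rw [pvMatchA, dif_pos hjm]
    have hvd : v.drop j = v[j] :: v.drop (j + 1) := List.drop_eq_getElem_cons hjm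
    by_cases hin : i + j ≥ t.length
    · have htd : t.drop (i + j) = [] := List.drop_eq_nil_of_le hin
      rw [if_pos hin, htd, hvd]
      simp
      exact hjm
    · have hlt : i + j < t.length := by omega
      rw [if_neg hin]
      have htd : t.drop (i + j) = t[i + j] :: t.drop (i + j + 1) := List.drop_eq_getElem_cons hlt
      have htake : (t.drop (i + j)).take (v.length - j)
          = t[i + j] :: (t.drop (i + j + 1)).take (v.length - (j + 1)) := by
        rw [htd]
        rw [show v.length - j = (v.length - (j + 1)) + 1 from by omega, List.take_succ_cons]
      have h1 : t.getD (i + j) ' ' = t[i + j] := List.getD_eq_getElem t ' ' hlt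
      have h2 : v.getD j ' ' = v[j] := List.getD_eq_getElem v ' ' hjm
      rw [htake, hvd]
      by_cases hne : t[i + j] = v[j]
      · rw [if_neg (by rw [h1, h2]; simpa using hne)]
        rw [ih (j + 1) (by omega)]
        constructor
        · intro hEq
          rw [hne]
          exact congrArg (v[j] :: ·) hEq
        · intro hEq
          have hc := List.cons_eq_cons.mp hEq
          exact hc.2
      · rw [if_pos (by rw [h1, h2]; simpa using hne)]
        constructor
        · intro hf; exact absurd hf (by simp)
        · intro hEq
          exact absurd (List.cons_eq_cons.mp hEq).1 hne

theorem pvMatchA_iff (t v : List Char) (i : Nat) :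
    pvMatchA t v i 0 = true ↔ (t.drop i).take v.length = v := by
  have := pvMatchA_iff_aux t v i (v.length - 0) 0 rfl
  simpa using this

-- unfolding facts about pvFindFrom
theorem pvFindFrom_none_step (t v : List Char) (i : Nat) (hv : 0 < v.length)
    (h : pvFindFrom t v i = none) :
    ¬ (t.drop i).take v.length = v ∧ pvFindFrom t v (i + 1) = none := by
  rw [pvFindFrom] at h
  by_cases hle : i + v.length ≤ t.length
  · rw [dif_pos hle] at h
    by_cases hs : (t.drop i).take v.length = v
    · simp [hs] at h
    · exact ⟨hs, by simpa [hs] using h⟩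
  · refine ⟨fun hs => hle (pvSliceEq_le t v i hv hs), ?_⟩
    rw [pvFindFrom, dif_neg (by omega : ¬ i + 1 + v.length ≤ t.length)]

theorem pvFindFrom_some_le (t v : List Char) :
    ∀ i p, pvFindFrom t v i = some p → i ≤ p ∧ (t.drop p).take v.length = v := by
  intro i
  induction i using pvFindFrom.induct t v with
  | case1 i hle hs => intro p h; rw [pvFindFrom, dif_pos hle, if_pos hs] at h
                      cases h; exact ⟨le_refl _, hs⟩
  | case2 i hle hs ih =>
    intro p h
    rw [pvFindFrom, dif_pos hle, if_neg hs] at h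
    obtain ⟨h1, h2⟩ := ih p h
    exact ⟨by omega, h2⟩
  | case3 i hle => intro p h; rw [pvFindFrom, dif_neg hle] at h; cases h

theorem pvFindFrom_some_step (t v : List Char) (i p : Nat)
    (h : pvFindFrom t v i = some p) :
    (p = i ∧ (t.drop i).take v.length = v) ∨
    (¬ (t.drop i).take v.length = v ∧ pvFindFrom t v (i + 1) = some p) := by
  rw [pvFindFrom] at h
  by_cases hle : i + v.length ≤ t.length
  · rw [dif_pos hle] at h
    by_cases hs : (t.drop i).take v.length = v
    · left; rw [if_pos hs] at h; cases h; exact ⟨rfl, hs⟩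
    · right; rw [if_neg hs] at h; exact ⟨hs, h⟩
  · rw [dif_neg hle] at h; cases h

-- A's loop, when pvFindFrom finds nothing from i, just copies the rest of t
theorem pvAGo_none (t v nu : List Char) (hv : 0 < v.length) :
    ∀ k i res fa, t.length - i ≤ k → t.length - i < fa →
      pvFindFrom t v i = none →
      pvAGo t v nu fa i res = res ++ t.drop i := by
  intro k
  induction k with
  | zero =>
    intro i res fa hk hfa hnone
    obtain ⟨fa, rfl⟩ : ∃ f, fa = f + 1 := ⟨fa - 1, by omega⟩
    have hni : ¬ i < t.length := by omega
    rw [pvAGo]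
    simp [hni, List.drop_eq_nil_of_le (le_of_not_gt hni)]
  | succ k ih =>
    intro i res fa hk hfa hnone
    obtain ⟨fa, rfl⟩ : ∃ f, fa = f + 1 := ⟨fa - 1, by omega⟩
    by_cases hi : i < t.length
    · obtain ⟨hns, hnext⟩ := pvFindFrom_none_step t v i hv hnone
      have hm : pvMatchA t v i 0 = false := by
        rw [← Bool.not_eq_true, pvMatchA_iff]; exact hns
      rw [pvAGo, if_pos hi, hm]
      simp only [Bool.false_eq_true, if_neg, if_false]
      rw [ih (i + 1) _ fa (by omega) (by omega) hnext]
      rw [List.getD_eq_getElem t ' ' hi, List.drop_eq_getElem_cons hi]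
      simp
    · rw [pvAGo]
      simp [hi, List.drop_eq_nil_of_le (le_of_not_gt hi)]

-- A's loop walks (copying chars) from i up to the next match position p, then consumes the match
theorem pvAGo_run (t v nu : List Char) (p : Nat) (hv : 0 < v.length) :
    ∀ d i res fa, p - i = d → pvFindFrom t v i = some p → t.length - i < fa →
      pvAGo t v nu fa i res
        = pvAGo t v nu (fa - (d + 1)) (p + v.length) (res ++ (t.drop i).take (p - i) ++ nu) := by
  intro d
  induction d with
  | zero =>
    intro i res fa hd hfind hfa
    have hip : p = i := by
      have := (pvFindFrom_some_le t v i p hfind).1; omega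
    subst hip
    have hs : (t.drop p).take v.length = v := by
      rcases pvFindFrom_some_step t v p p hfind with ⟨_, hs⟩ | ⟨_, hnext⟩
      · exact hs
      · have := (pvFindFrom_some_le t v (p + 1) p hnext).1; omega
    have hle : p + v.length ≤ t.length := pvSliceEq_le t v p hv hs
    have hmt : pvMatchA t v p 0 = true := (pvMatchA_iff t v p).mpr hs
    have hi : p < t.length := by omega
    obtain ⟨fa, rfl⟩ : ∃ f, fa = f + 1 := ⟨fa - 1, by omega⟩
    rw [pvAGo, if_pos hi, hmt]
    simp
  | succ d ih =>
    intro i res fa hd hfind hfa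
    have hip : i < p := by omega
    rcases pvFindFrom_some_step t v i p hfind with ⟨hip', _⟩ | ⟨hns, hnext⟩
    · omega
    have hple : p + v.length ≤ t.length :=
      pvSliceEq_le t v p hv (pvFindFrom_some_le t v i p hfind).2
    have hi : i < t.length := by omega
    have hm : pvMatchA t v i 0 = false := by
      rw [← Bool.not_eq_true, pvMatchA_iff]; exact hns
    obtain ⟨fa, rfl⟩ : ∃ f, fa = f + 1 := ⟨fa - 1, by omega⟩
    rw [pvAGo, if_pos hi, hm]
    simp only [Bool.false_eq_true, if_neg, if_false]
    rw [ih (i + 1) _ fa (by omega) hnext (by omega)]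
    have htake : (t.drop i).take (p - i) = t[i] :: (t.drop (i + 1)).take (p - (i + 1)) := by
      rw [List.drop_eq_getElem_cons hi]
      rw [show p - i = (p - (i + 1)) + 1 from by omega, List.take_succ_cons]
    rw [show fa - (d + 1) = fa + 1 - (d + 1 + 1) from by omega,
        List.getD_eq_getElem t ' ' hi, htake]
    simp

-- main equivalence of the two loops
theorem pvGo_eq (t v nu : List Char) (hv : 0 < v.length) :
    ∀ k i acc fa fb, t.length - i ≤ k → t.length - i < fa → t.length - i < fb →
      pvAGo t v nu fa i acc = pvBGo t v nu fb i acc := by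
  intro k
  induction k using Nat.strong_induction_on with
  | _ k ih =>
    intro i acc fa fb hk hfa hfb
    obtain ⟨fb, rfl⟩ : ∃ f, fb = f + 1 := ⟨fb - 1, by omega⟩
    by_cases hi : i < t.length
    · cases hfind : pvFindFrom t v i with
      | none =>
        rw [pvAGo_none t v nu hv k i acc fa hk hfa hfind, pvBGo, if_pos hi, hfind]
      | some p =>
        obtain ⟨hip, hs⟩ := pvFindFrom_some_le t v i p hfind
        have hple : p + v.length ≤ t.length := pvSliceEq_le t v p hv hs
        rw [pvAGo_run t v nu p hv (p - i) i acc fa rfl hfind hfa, pvBGo, if_pos hi, hfind]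
        have hkpos : 0 < k := by omega
        exact ih (k - 1) (by omega) (p + v.length) _ _ _ (by omega) (by omega) (by omega)
    · obtain ⟨fa, rfl⟩ : ∃ f, fa = f + 1 := ⟨fa - 1, by omega⟩
      rw [pvAGo, pvBGo]
      simp [hi, List.drop_eq_nil_of_le (le_of_not_gt hi)]

-- ===== VERDICT (by name: the statement is the Claim_ definition above) =====
theorem mi_replace_spec : Claim_equal_mi_replace := by
  intro texto viejo nuevo _hDom hPre
  unfold Spec_mi_replace mi_replace mi_replace_alt
  by_cases hvempty : viejo = ""
  · rw [hvempty, hPre hvempty]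
    rfl
  · have hv : 0 < viejo.toList.length := by
      rcases Nat.eq_zero_or_pos viejo.toList.length with h0 | h
      · exact absurd (String.toList_eq_nil_iff.mp (List.length_eq_zero_iff.mp h0)) hvempty
      · exact h
    exact congrArg String.ofList
      (pvGo_eq texto.toList viejo.toList nuevo.toList hv texto.toList.length 0 []
        (texto.toList.length + 1) (texto.toList.length + 1) (by omega) (by omega) (by omega))
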